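/-
  SEGMENT R14 OF `start_decoder` (0x11655f – 0x116657: one mode record, the body of loop 4143, stb_vorbis_fixed.c 4144 – 4152; 59
  instructions, 7 contract calls — get_bits ×4, error ×3 —, 10 check sites) SPLIT AT THE RETURNS OF THE FOUR get_bits, the three
  error stubs in a child of their own: the assertions at the cut points, the claims of the six children, and the composition
  `SegR14.of_parts` (pure logic: `ReachVia.trans`; no machine step).  The shape is that of vorbis_decode_packet_rest.2
  (Vorbis/Spec/PacketRest2.lean: a segment cut at its get_bits returns) with the stub child of start_decoder.2
  (Vorbis/Spec/StartDecoder2.lean: `IsStub`, `Seg2d`).  The farm worker of the parent (report start_decoder.R14, attempt 1: TIMEOUT)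
  walked exactly these four pieces (`stage1` … `stage4` of its Lemmas.lean) and ran out of time in the fifth.

      R14a  0x11655f–0x116576, returns into 0x11657b (cut312)   rbx = `&f->mode_config[i]`; `get_bits(f, 1)`
                                                                exit: AtR14a (the loop assertion at cut312, rbx, rax < 2)
      R14b  0x11657b–0x116591, returns into 0x116596 (cut313)   checked store1 `m->blockflag = al`; `get_bits(f, 16)`
                                                                exit: AtR14b (… + `blockflag ≤ 1`)
      R14c  0x116596–0x1165b2, returns into 0x1165b7 (cut314)   r13 = `&m->windowtype`; checked store2 `m->windowtype = ax`;
                                                                `get_bits(f, 16)`          exit: AtR14c (… + r13)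
      R14d  0x1165b7–0x1165d0, returns into 0x1165d5 (cut315)   checked store2 `m->transformtype = ax`; `get_bits(f, 8)`
                                                                exit: AtR14d (the same at cut315)
      R14e  0x1165d5–0x1165f2, 0x116606–0x116614,               checked store1 `m->mapping = al`; the three tests (checked load2, load2,
            0x116628–0x11663f, 0x116653–0x116657                load4): a test fails: the entry of its stub (exit AtR14Stub); else
                                                                `add r14d, 1 ; jmp 115f67`: exit AtR13 (i + 1) (`ModeUpTo.succ`)
      R14f  0x1165f4–0x116601, 0x116616–0x116623,               the three stubs `mov esi, 14H ; mov rdi, rbp ; call error ; jmp 113b22`: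
            0x116641–0x11664e                                   exit AtERR (eax = 0, `Failed` by `Mid.failed_late`)

  WHAT IS LIVE AT THE CUTS (read off c/vorbis_f.dis 11655f … 11665c):
      0x11657b (cut312)  reads eax (→ r12b, stored as `blockflag` 0x116586: `get_bits(f, 1)` < 2), rbx (0x11657e), rbp, rsp; r14 (R14e).
      0x116596 (cut313)  reads eax (→ r12w, stored 0x1165a5), rbx (0x116599: r13 = rbx + 2 is WRITTEN here), rbp, rsp, r14.
      0x1165b7 (cut314)  reads eax (→ r12w, stored 0x1165c3), rbx (0x1165ba), r13 (the check argument at 0x1165e5), rbp, rsp, r14.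
      0x1165d5 (cut315)  reads eax (→ r12b, stored 0x1165e1, re-used zero-extended 0x116628), rbx, r13, rbp, rsp, r14.
      a stub's entry     reads rbp only.
  rax carries NO constraint at cut313, cut314, cut315: `windowtype`, `transformtype` are re-read FROM MEMORY and tested against 0
  (0x1165ed, 0x11660f), `mapping` is `movzx r12d, r12b` tested against `mapping_count` (0x116638); only `blockflag ≤ 1` (MD2's first
  clause, never tested by the code) must cross the cuts, and it does as a fact about the stored byte.  r12 is dead at every cut
  (rewritten by the first instruction after each return).

  New labels (table `AT` of c/gen_labels.py): `at_1165f4`, `at_116616`, `at_116641` — the three stubs' first instructions (the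
  fall-through of a `je` / `jl`: no label there).  The cut labels cut312 … cut315 exist in Vorbis/Labels.lean.

  THE CARRY LEMMA the children use: `ModeLoop.carry` of Vorbis/Spec/StartDecoderMapMode.lean (windows `ModeWin g i`: the reader's
  fields, `error`'s, the pushed return addresses, the stores into mode record `i`); hints for the workers:
  farm/hints/start_decoder.R14.md.
-/
import Vorbis.Spec.StartDecoderMapMode
import Vorbis.LabelsAt
namespace Vorbis.Spec.StartDecoder
open X86 X86.User Asan

/-! ### The assertions at the cut points -/

/-- **A point inside segment R14** at the program counter `pc`: the invariant of loop 4143 there (`Frame`, `Hand`, `Mid g 8 8 9`,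
rbp = f, r14 = i, `ModeUpTo … i`), `i < mode_count`, and rbx = the address of mode record `i`. -/
structure InR14 (u₀ : State) (g : Ghost) (pc : Word) (i : Nat) (A : Arena × List Obj) (v : State) : Prop where
  /-- the loop assertion at `pc` -/
  loop : ModeLoop u₀ g pc i A v
  /-- the loop test of R13 (`mode_count`, `[f + 480, f + 484)`, is written by nothing in the segment) -/
  lt : (i : Int) < stb_vorbis.mode_count v.mem g.f
  /-- rbx = `&f->mode_config[i]` = f + 1E4H + 6·i (established 0x116566; read 0x11657e … 0x11660f) -/
  rbx : v.reg .rbx = addr (stb_vorbis.mode_config_at g.f i)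

/-- **A point inside segment R14 after the store of `blockflag`** (0x116586): the stored byte is `get_bits(f, 1)` ≤ 1, MD2's first
clause, consumed by the exit's `ModeRecOK` (the later stores go to the bytes 1 … 5 of the record). -/
structure InR14F (u₀ : State) (g : Ghost) (pc : Word) (i : Nat) (A : Arena × List Obj) (v : State) : Prop where
  /-- the point -/
  pt : InR14 u₀ g pc i A v
  /-- `m->blockflag ≤ 1` -/
  flag : Mode.blockflag v.mem (stb_vorbis.mode_config_at g.f i) ≤ 1

/-- **cut312 (0x11657b), the return of `get_bits(f, 1)`**: the point, and the reader's result: one bit (`GetBitsResult 1`, about the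
full register). -/
def AtR14a (u₀ : State) (g : Ghost) (i : Nat) (v : State) : Prop :=
  ∃ A, InR14 u₀ g L.start_decoder.cut312 i A v ∧ (v.reg .rax).toNat < 2

/-- **cut313 (0x116596), the return of `get_bits(f, 16)`** (windowtype): the point with `blockflag ≤ 1`. rax is unconstrained. -/
def AtR14b (u₀ : State) (g : Ghost) (i : Nat) (v : State) : Prop :=
  ∃ A, InR14F u₀ g L.start_decoder.cut313 i A v

/-- **cut314 (0x1165b7), the return of `get_bits(f, 16)`** (transformtype): the point with `blockflag ≤ 1`, and r13 = `&m->windowtype`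
(established 0x116599; the check argument at 0x1165e5). rax is unconstrained. -/
def AtR14c (u₀ : State) (g : Ghost) (i : Nat) (v : State) : Prop :=
  ∃ A, InR14F u₀ g L.start_decoder.cut314 i A v ∧ v.reg .r13 = addr (stb_vorbis.mode_config_at g.f i + 2)

/-- **cut315 (0x1165d5), the return of `get_bits(f, 8)`** (mapping): as at cut314. rax is unconstrained (its low byte is stored, then
tested zero-extended against `mapping_count`). -/
def AtR14d (u₀ : State) (g : Ghost) (i : Nat) (v : State) : Prop :=
  ∃ A, InR14F u₀ g L.start_decoder.cut315 i A v ∧ v.reg .r13 = addr (stb_vorbis.mode_config_at g.f i + 2)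

/-- **The entry of one of the three error stubs of segment R14** (`mov esi, 14H ; mov rdi, rbp ; call error ; jmp 113b22`: lines 4149,
4150, 4151). -/
def IsStubR14 (pc : Word) : Prop :=
  pc = Vorbis.L.start_decoder.at_1165f4 ∨ pc = Vorbis.L.start_decoder.at_116616 ∨ pc = Vorbis.L.start_decoder.at_116641

/-- **A point of the segment at the entry of an error stub**: the loop assertion at one of the three addresses (a stub reads rbp
only; `Failed` comes from `Mid.failed_late`: every H-clause is a finished group since SD.8). -/
def AtR14Stub (u₀ : State) (g : Ghost) (i : Nat) (v : State) : Prop :=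
  ∃ A pc, IsStubR14 pc ∧ ModeLoop u₀ g pc i A v

/-! ### The claims of the children -/

/-- **Segment `start_decoder.R14a`** (0x11655f – 0x116576): rbx = `&f->mode_config[i]`, `get_bits(f, 1)`; exit at its return. -/
def SegR14a (Lay : Layout) (μ : Microarch) (u₀ : State) : Prop :=
  ∀ (g : Ghost) (i : Nat) (v : State), AtR14 u₀ g i v → ReachVia Lay μ WayInv v (fun w => AtR14a u₀ g i w)

/-- **Segment `start_decoder.R14b`** (0x11657b – 0x116591): `m->blockflag = al` (checked store1), `get_bits(f, 16)`; exit at its return. -/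
def SegR14b (Lay : Layout) (μ : Microarch) (u₀ : State) : Prop :=
  ∀ (g : Ghost) (i : Nat) (v : State), AtR14a u₀ g i v → ReachVia Lay μ WayInv v (fun w => AtR14b u₀ g i w)

/-- **Segment `start_decoder.R14c`** (0x116596 – 0x1165b2): `m->windowtype = ax` (checked store2), `get_bits(f, 16)`; exit at its
return. -/
def SegR14c (Lay : Layout) (μ : Microarch) (u₀ : State) : Prop :=
  ∀ (g : Ghost) (i : Nat) (v : State), AtR14b u₀ g i v → ReachVia Lay μ WayInv v (fun w => AtR14c u₀ g i w)

/-- **Segment `start_decoder.R14d`** (0x1165b7 – 0x1165d0): `m->transformtype = ax` (checked store2), `get_bits(f, 8)`; exit at its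
return. -/
def SegR14d (Lay : Layout) (μ : Microarch) (u₀ : State) : Prop :=
  ∀ (g : Ghost) (i : Nat) (v : State), AtR14c u₀ g i v → ReachVia Lay μ WayInv v (fun w => AtR14d u₀ g i w)

/-- **Segment `start_decoder.R14e`** (0x1165d5 – 0x1165f2, 0x116606 – 0x116614, 0x116628 – 0x11663f, 0x116653 – 0x116657): `m->mapping = al`
(checked store1); `windowtype ≠ 0`, `transformtype ≠ 0`, `mapping ≥ mapping_count`: the entry of the test's error stub; else
`++i`: the head of loop 4143 with `i + 1` (MD2 for record `i`: `ModeUpTo.succ`). -/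
def SegR14e (Lay : Layout) (μ : Microarch) (u₀ : State) : Prop :=
  ∀ (g : Ghost) (i : Nat) (v : State), AtR14d u₀ g i v →
    ReachVia Lay μ WayInv v (fun w => AtR13 u₀ g (i + 1) w ∨ AtR14Stub u₀ g i w)

/-- **Segment `start_decoder.R14f`, the three error stubs** (0x1165f4 – 0x116601, 0x116616 – 0x116623, 0x116641 – 0x11664e: `return error(f,
VORBIS_invalid_setup)` of lines 4149, 4150, 4151): from a point at a stub's entry to the epilogue with eax = 0 (`AtERR`). -/
def SegR14f (Lay : Layout) (μ : Microarch) (u₀ : State) : Prop :=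
  ∀ (g : Ghost) (i : Nat) (v : State), AtR14Stub u₀ g i v → ReachVia Lay μ WayInv v (fun w => AtERR u₀ g w)

/-! ### The composition -/

/-- **THE COMPOSITION of the split of segment R14**: a → b → c → d → e → (the next iteration ∨ f → the epilogue). Pure logic: no
machine step. -/
theorem SegR14.of_parts {Lay : Layout} {μ : Microarch} {u₀ : State}
    (ha : SegR14a Lay μ u₀) (hb : SegR14b Lay μ u₀) (hc : SegR14c Lay μ u₀) (hd : SegR14d Lay μ u₀)
    (he : SegR14e Lay μ u₀) (hf : SegR14f Lay μ u₀) : SegR14 Lay μ u₀ := by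
  intro g i v hv
  refine (ha g i v hv).trans ?_
  intro w1 h1
  refine (hb g i w1 h1).trans ?_
  intro w2 h2
  refine (hc g i w2 h2).trans ?_
  intro w3 h3
  refine (hd g i w3 h3).trans ?_
  intro w4 h4
  refine (he g i w4 h4).trans ?_
  intro w5 h5
  rcases h5 with hnext | hstub
  · exact ReachVia.done (Or.inl hnext)
  · exact (hf g i w5 hstub).mono (fun _ hx => Or.inr hx)

/-! ### The exits, as pure logic -/

namespace R14

/-- **The exit to the next iteration** (R14e, 0x116653 `add r14d, 1 ; jmp 115f67`): from the loop assertion carried to the exit state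
(`ModeLoop.carry`: counter still `i`, r14 not yet incremented in the statement `hl`), the incremented r14, `i < mode_count` and MD2 for
record `i` (`blockflag ≤ 1` from the cut assertion; the three tests) to `AtR13 (i + 1)`. -/
theorem toR13 {u₀ : State} {g : Ghost} {i : Nat} {A : Arena × List Obj} {w : State}
    (hl : ModeLoop u₀ g pc_R13 i A w) (hlt : (i : Int) < stb_vorbis.mode_count w.mem g.f)
    (hr14 : w.reg .r14 = addr (i + 1)) (hrec : ModeRecOK w.mem g.f i) : AtR13 u₀ g (i + 1) w := by
  refine ⟨A, ?_⟩
  have hmodes := hl.modes.succ hlt hrec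
  exact
    { frame := hl.frame
      hand := hl.hand
      mid := hl.mid
      rbp := hl.rbp
      r14 := hr14
      i_le := hmodes.n_le
      modes := hmodes }

end R14

end Vorbis.Spec.StartDecoder
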